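-- pv_equiv track=rewrite | github.com/changmillet/TianGong-LCA-Spec-Coding | src/tiangong_lca_spec/process_update/updater.py | _camel_to_sentence
-- ===== SOURCE A (Python) =====
-- def _camel_to_sentence(value: str) -> str:
--     if not value:
--         return value
--     chars: list[str] = []
--     current = value[0]
--     for char in value[1:]:
--         if char.isupper():
--             chars.append(current)
--             current = char.lower()
--         else:
--             current += char
--     chars.append(current)
--     words = [segment.lower() for segment in chars if segment]
--     if not words:
--         return value
--     words[0] = words[0].capitalize()
--     return " ".join(words)
-- ===== SOURCE B (Python) =====
-- def _camel_to_sentence(value: str) -> str: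
--     if not value:
--         return value
--     out = [value[0].upper()]
--     for ch in value[1:]:
--         if ch.isupper():
--             out.append(" ")
--         out.append(ch.lower())
--     return "".join(out)
-- ===== Notes on version B (the rewrite author's own statement) =====
-- stated objective: simpler
-- what changed: B emits the output char-by-char in one pass (a space before each interior uppercase char, everything lowered, first char uppered) instead of accumulating segment strings and then filtering, lowercasing, capitalizing and joining them.
import Mathlib
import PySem

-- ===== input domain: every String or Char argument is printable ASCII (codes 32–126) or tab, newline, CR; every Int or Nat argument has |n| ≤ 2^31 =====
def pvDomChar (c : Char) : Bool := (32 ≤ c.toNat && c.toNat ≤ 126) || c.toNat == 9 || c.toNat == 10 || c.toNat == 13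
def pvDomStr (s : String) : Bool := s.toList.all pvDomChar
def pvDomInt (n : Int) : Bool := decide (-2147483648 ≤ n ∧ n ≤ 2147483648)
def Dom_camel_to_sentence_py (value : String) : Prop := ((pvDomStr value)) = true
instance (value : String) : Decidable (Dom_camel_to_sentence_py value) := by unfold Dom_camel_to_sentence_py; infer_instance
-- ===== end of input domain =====

-- B builds the output in one left-to-right pass instead of accumulating, filtering,
-- lowercasing, capitalizing and joining segment strings (objective: simpler).

-- ===== PORT A =====
-- Python str.capitalize(); exact on the ASCII domain (ASCII titlecase = upper)
def capPy (w : List Char) : List Char :=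
  match w with
  | [] => []
  | c :: cs => PySem.Chars.upperChar c :: PySem.Chars.lower cs

def camel_to_sentence_py (value : String) : String :=
  match value.toList with
  | [] => value
  | c :: rest =>
    let st := rest.foldl
      (fun (st : List (List Char) × List Char) ch =>
        if PySem.Chars.isupper ch then (st.1 ++ [st.2], [PySem.Chars.lowerChar ch])
        else (st.1, st.2 ++ [ch]))
      ([], [c])
    let chars := st.1 ++ [st.2]
    let words := (chars.filter (fun s => !s.isEmpty)).map PySem.Chars.lower
    match words with
    | [] => value
    | w :: ws => String.ofList (PySem.Chars.join [' '] (capPy w :: ws))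

-- ===== PORT B =====
def camel_to_sentence_py_alt (value : String) : String :=
  match value.toList with
  | [] => value
  | c :: rest =>
    String.ofList (PySem.Chars.upperChar c ::
      rest.flatMap (fun ch =>
        if PySem.Chars.isupper ch then [' ', PySem.Chars.lowerChar ch]
        else [PySem.Chars.lowerChar ch]))

-- ===== PRECONDITION & SPEC =====
def Spec_camel_to_sentence_py (value : String) (out : String) : Prop := out = camel_to_sentence_py_alt value
instance (value : String) (out : String) : Decidable (Spec_camel_to_sentence_py value out) := by unfold Spec_camel_to_sentence_py; infer_instance

-- ===== CLAIM (what is proved, stated in full; the proofs are below) =====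
def Claim_equal_camel_to_sentence_py : Prop := ∀ (value : String), Dom_camel_to_sentence_py value → Spec_camel_to_sentence_py value (camel_to_sentence_py value)

-- ===== LEMMAS AND PROOFS =====

-- the segment list A's loop produces, written as structural recursion
def splitSegs (cur : List Char) : List Char → List (List Char)
  | [] => [cur]
  | ch :: rest =>
    if PySem.Chars.isupper ch then cur :: splitSegs [PySem.Chars.lowerChar ch] rest
    else splitSegs (cur ++ [ch]) rest

-- B's per-character emission
def bstep (ch : Char) : List Char :=
  if PySem.Chars.isupper ch then [' ', PySem.Chars.lowerChar ch] else [PySem.Chars.lowerChar ch]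

theorem isupper_iff (c : Char) : PySem.Chars.isupper c = true ↔ 65 ≤ c.toNat ∧ c.toNat ≤ 90 := by
  simp only [PySem.Chars.isupper, Bool.and_eq_true, decide_eq_true_eq, Char.le_def,
    Char.reduceVal, UInt32.le_iff_toNat_le, UInt32.reduceToNat, Char.toNat_val]

theorem islower_iff (c : Char) : PySem.Chars.islower c = true ↔ 97 ≤ c.toNat ∧ c.toNat ≤ 122 := by
  simp only [PySem.Chars.islower, Bool.and_eq_true, decide_eq_true_eq, Char.le_def,
    Char.reduceVal, UInt32.le_iff_toNat_le, UInt32.reduceToNat, Char.toNat_val]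

theorem toNat_ofNat_valid (n : Nat) (h : n.isValidChar) : (Char.ofNat n).toNat = n := by
  simp [Char.ofNat, h, Char.toNat, Char.ofNatAux]

theorem toNat_ofNat_upper_shift (c : Char) (h : PySem.Chars.isupper c = true) :
    (Char.ofNat (c.toNat + 32)).toNat = c.toNat + 32 := by
  have h' := (isupper_iff c).mp h
  exact toNat_ofNat_valid _ (Or.inl (by omega))

theorem lowerChar_lowerChar (c : Char) :
    PySem.Chars.lowerChar (PySem.Chars.lowerChar c) = PySem.Chars.lowerChar c := by
  by_cases h : PySem.Chars.isupper c = true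
  · have h' := (isupper_iff c).mp h
    have ht := toNat_ofNat_upper_shift c h
    have h2 : PySem.Chars.isupper (Char.ofNat (c.toNat + 32)) = false := by
      rw [Bool.eq_false_iff, Ne, isupper_iff, ht]; omega
    simp [PySem.Chars.lowerChar, h, h2]
  · simp [PySem.Chars.lowerChar, h]

theorem upperChar_lowerChar (c : Char) :
    PySem.Chars.upperChar (PySem.Chars.lowerChar c) = PySem.Chars.upperChar c := by
  by_cases h : PySem.Chars.isupper c = true
  · have h' := (isupper_iff c).mp h
    have ht := toNat_ofNat_upper_shift c h
    have h2 : PySem.Chars.islower (Char.ofNat (c.toNat + 32)) = true := by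
      rw [islower_iff, ht]; omega
    have h3 : PySem.Chars.islower c = false := by
      rw [Bool.eq_false_iff, Ne, islower_iff]; omega
    have h4 : Char.ofNat ((Char.ofNat (c.toNat + 32)).toNat - 32) = c := by
      rw [ht]; simp [Char.ofNat_toNat]
    simp [PySem.Chars.upperChar, PySem.Chars.lowerChar, h, h2, h3, h4]
  · simp [PySem.Chars.lowerChar, h]

theorem foldA (rest : List Char) : ∀ (acc : List (List Char)) (cur : List Char),
    (let st := rest.foldl
      (fun (st : List (List Char) × List Char) ch =>
        if PySem.Chars.isupper ch then (st.1 ++ [st.2], [PySem.Chars.lowerChar ch])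
        else (st.1, st.2 ++ [ch])) (acc, cur)
     st.1 ++ [st.2]) = acc ++ splitSegs cur rest := by
  induction rest with
  | nil => intro acc cur; simp [splitSegs]
  | cons ch rest ih =>
    intro acc cur
    simp only [List.foldl_cons, splitSegs]
    by_cases h : PySem.Chars.isupper ch = true <;> simp [h, ih] 

theorem splitSegs_ne_nil (rest : List Char) (cur : List Char) : splitSegs cur rest ≠ [] := by
  induction rest generalizing cur with
  | nil => simp [splitSegs]
  | cons ch rest ih => simp only [splitSegs]; split_ifs <;> simp [ih]

theorem splitSegs_mem_ne_nil (rest : List Char) : ∀ (cur : List Char), cur ≠ [] →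
    ∀ s ∈ splitSegs cur rest, s ≠ [] := by
  induction rest with
  | nil => intro cur h s hs; simp [splitSegs] at hs; simpa [hs]
  | cons ch rest ih =>
    intro cur h s hs
    simp only [splitSegs] at hs
    split_ifs at hs with hu
    · rcases List.mem_cons.mp hs with rfl | hs
      · exact h
      · exact ih _ (by simp) s hs
    · exact ih _ (by simp) s hs

theorem splitSegs_head (rest : List Char) : ∀ (cur : List Char),
    ∃ t segs, splitSegs cur rest = (cur ++ t) :: segs := by
  induction rest with
  | nil => intro cur; exact ⟨[], [], by simp [splitSegs]⟩
  | cons ch rest ih =>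
    intro cur
    simp only [splitSegs]
    split_ifs
    · exact ⟨[], splitSegs [PySem.Chars.lowerChar ch] rest, by simp⟩
    · obtain ⟨t, segs, h⟩ := ih (cur ++ [ch])
      exact ⟨[ch] ++ t, segs, by simp [h]⟩

theorem join_cons_head (x : Char) (u : List Char) (l : List (List Char)) :
    PySem.Chars.join [' '] ((x :: u) :: l) = x :: PySem.Chars.join [' '] (u :: l) := by
  cases l with
  | nil => simp [PySem.Chars.join_singleton]
  | cons b l => simp [PySem.Chars.join_cons_cons]

theorem segjoin (rest : List Char) : ∀ (cur : List Char),
    PySem.Chars.join [' '] ((splitSegs cur rest).map PySem.Chars.lower)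
      = PySem.Chars.lower cur ++ rest.flatMap bstep := by
  induction rest with
  | nil => intro cur; simp [splitSegs, PySem.Chars.join_singleton]
  | cons ch rest ih =>
    intro cur
    simp only [splitSegs, List.flatMap_cons, bstep]
    split_ifs with hu
    · obtain ⟨b, l, hb⟩ := List.exists_cons_of_ne_nil (splitSegs_ne_nil rest [PySem.Chars.lowerChar ch])
      rw [List.map_cons, hb, List.map_cons, PySem.Chars.join_cons_cons, ← List.map_cons, ← hb, ih]
      simp [PySem.Chars.lower, lowerChar_lowerChar]
    · rw [ih]
      simp [PySem.Chars.lower]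

-- ===== VERDICT (by name: the statement is the Claim_ definition above) =====
theorem camel_to_sentence_py_spec : Claim_equal_camel_to_sentence_py := by
  intro value _
  unfold Spec_camel_to_sentence_py camel_to_sentence_py camel_to_sentence_py_alt
  cases hv : value.toList with
  | nil => rfl
  | cons c rest =>
    simp only [foldA rest [] [c], List.nil_append]
    have hfil : (splitSegs [c] rest).filter (fun s => !s.isEmpty) = splitSegs [c] rest := by
      apply List.filter_eq_self.mpr
      intro s hs
      simpa [List.isEmpty_iff] using splitSegs_mem_ne_nil rest [c] (by simp) s hs
    rw [hfil]
    obtain ⟨t, segs, hsegs⟩ := splitSegs_head rest [c]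
    rw [hsegs]
    simp only [List.cons_append, List.nil_append, List.map_cons]
    have hcap : capPy (PySem.Chars.lower (c :: t))
        = PySem.Chars.upperChar c :: PySem.Chars.lower t := by
      simp [capPy, PySem.Chars.lower, upperChar_lowerChar, List.map_map, Function.comp,
        lowerChar_lowerChar]
    rw [hcap, join_cons_head]
    have hsj := segjoin rest [c]
    rw [hsegs] at hsj
    simp only [List.cons_append, List.nil_append, List.map_cons, PySem.Chars.lower,
      List.map_nil] at hsj
    rw [join_cons_head] at hsj
    rw [List.cons_eq_cons] at hsj
    simp only [PySem.Chars.lower, hsj.2]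
    rfl
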